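-- pv_equiv track=rewrite | github.com/g-s01/data-programming-btp | gautam-results-and-analysis/raw-to-fine-direct/through-lfs/context-window-one/lfs_for_raw_sentence_gpt.py | label_sentence_CreativeWorks_Software
-- ===== SOURCE A (Python) =====
-- ABSTAIN = -1
--
-- CreativeWorks_Software = 16
--
-- def label_sentence_CreativeWorks_Software(tokens):
--     """
--     Labels each token in a sentence as CreativeWorks_Software if it indicates a software product, program, or video game.
--     Returns ABSTAIN for tokens that do not match the category.
--
--     Args:
--     tokens: list of str - A list of words representing a sentence.
--
--     Returns:
--     list of str - A list of labels for each token.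
--     """
--     software_indicators = {
--         'hypertext', 'lego', 'batman', 'dc', 'super', 'heroes', 'resident', 'evil', 'nemesis',
--         'mario', 'mycroft', 'infocom', 'sherlock', 'hes', 'excel', 'photoshop', 'word',
--         'powerpoint', 'autocad', 'blender', 'gimp', 'slack', 'notepad++', 'vim', 'sublime',
--         'atom', 'mysql', 'postgresql', 'oracle', 'firefox', 'chrome', 'safari', 'internet',
--         'explorer', 'outlook', 'thunderbird', 'skype', 'teams', 'zoom', 'discord', 'trello',
--         'asana', 'jira', 'confluence', 'unity', 'unreal', 'godot', 'tiktok', 'snapchat'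
--     }
--     software_context = {
--         'game', 'program', 'app', 'application', 'software', 'tool', 'platform', 'developed',
--         'released', 'published', 'version', 'update', 'patch', 'module'
--     }
--
--     labels = []
--
--     for i, token in enumerate(tokens):
--         token_lower = token.lower()
--
--         # Check if the token or surrounding tokens suggest software
--         if (
--             token_lower in software_indicators and (  # The token itself indicates software
-- #            token_lower in software_names or  # Specific software names
--             (i > 0 and tokens[i - 1].lower() in software_indicators) or  # Preceded by a software indicator
--             (i < len(tokens) - 1 and tokens[i + 1].lower() in software_indicators) or  # Followed by a software indicator
--             (i > 0 and tokens[i - 1].lower() in software_context) or  # Preceded by a software context keyword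
--             (i < len(tokens) - 1 and tokens[i + 1].lower() in software_context))  # Followed by a software context keyword
--         ):
--             labels.append(CreativeWorks_Software)
--         else:
--             labels.append(ABSTAIN)  # Default to 'O' if no match is found
--
--     return labels
-- ===== SOURCE B (Python) =====
-- ABSTAIN = -1
--
-- CreativeWorks_Software = 16
--
-- def label_sentence_CreativeWorks_Software(tokens):
--     software_indicators = {
--         'hypertext', 'lego', 'batman', 'dc', 'super', 'heroes', 'resident', 'evil', 'nemesis',
--         'mario', 'mycroft', 'infocom', 'sherlock', 'hes', 'excel', 'photoshop', 'word',
--         'powerpoint', 'autocad', 'blender', 'gimp', 'slack', 'notepad++', 'vim', 'sublime',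
--         'atom', 'mysql', 'postgresql', 'oracle', 'firefox', 'chrome', 'safari', 'internet',
--         'explorer', 'outlook', 'thunderbird', 'skype', 'teams', 'zoom', 'discord', 'trello',
--         'asana', 'jira', 'confluence', 'unity', 'unreal', 'godot', 'tiktok', 'snapchat'
--     }
--     software_context = {
--         'game', 'program', 'app', 'application', 'software', 'tool', 'platform', 'developed',
--         'released', 'published', 'version', 'update', 'patch', 'module'
--     }
--     # Edge pass: scan each ADJACENT PAIR once and collect the set of positions that
--     # the pair marks (an indicator next to an indicator-or-context word).
--     marked = set()
--     for i in range(len(tokens) - 1):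
--         a = tokens[i].lower()
--         b = tokens[i + 1].lower()
--         if a in software_indicators and (b in software_indicators or b in software_context):
--             marked.add(i)
--         if b in software_indicators and (a in software_indicators or a in software_context):
--             marked.add(i + 1)
--     # Output pass: label from the marked-position set.
--     return [CreativeWorks_Software if i in marked else ABSTAIN for i in range(len(tokens))]
-- ===== Notes on version B (the rewrite author's own statement) =====
-- stated objective: alternative
-- what changed: B scans adjacent PAIRS once, collecting into a set the positions marked by each edge (indicator next to indicator-or-context), then emits labels by membership in that set, instead of A's per-token pass that re-tests both neighbours of every position.
import Mathlib
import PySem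

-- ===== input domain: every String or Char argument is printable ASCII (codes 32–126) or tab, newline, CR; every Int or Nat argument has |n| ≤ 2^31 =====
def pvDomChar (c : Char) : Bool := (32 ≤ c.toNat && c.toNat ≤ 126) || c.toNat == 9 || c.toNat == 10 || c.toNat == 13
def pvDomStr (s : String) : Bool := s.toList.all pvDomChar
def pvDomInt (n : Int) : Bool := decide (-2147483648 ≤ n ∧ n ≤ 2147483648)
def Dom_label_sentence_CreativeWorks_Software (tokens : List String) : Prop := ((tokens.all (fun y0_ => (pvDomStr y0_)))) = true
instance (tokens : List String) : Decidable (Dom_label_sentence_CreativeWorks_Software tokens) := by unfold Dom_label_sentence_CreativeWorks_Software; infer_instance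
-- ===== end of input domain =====

-- B scans adjacent PAIRS once, collecting into a set the positions each edge marks, then
-- emits labels by membership in that set (objective: alternative edge-based decomposition).

-- ===== PORT A =====
-- the set literal 'software_indicators' (distinct literals, so the Python set is exactly these)
def pvSwInd : List String :=
  ["hypertext", "lego", "batman", "dc", "super", "heroes", "resident", "evil", "nemesis",
   "mario", "mycroft", "infocom", "sherlock", "hes", "excel", "photoshop", "word",
   "powerpoint", "autocad", "blender", "gimp", "slack", "notepad++", "vim", "sublime",
   "atom", "mysql", "postgresql", "oracle", "firefox", "chrome", "safari", "internet",
   "explorer", "outlook", "thunderbird", "skype", "teams", "zoom", "discord", "trello",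
   "asana", "jira", "confluence", "unity", "unreal", "godot", "tiktok", "snapchat"]

-- the set literal 'software_context'
def pvSwCtx : List String :=
  ["game", "program", "app", "application", "software", "tool", "platform", "developed",
   "released", "published", "version", "update", "patch", "module"]

def pvCondA (tokens : List String) (p : Int × String) : Bool :=
  let i := p.1
  let token := p.2
  let tl := PySem.Str.lower token
  pvSwInd.contains tl &&
    ((decide (0 < i) && pvSwInd.contains (PySem.Str.lower (PySem.List.pyGetD tokens (i - 1) ""))) ||
     (decide (i < (tokens.length : Int) - 1) && pvSwInd.contains (PySem.Str.lower (PySem.List.pyGetD tokens (i + 1) ""))) ||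
     (decide (0 < i) && pvSwCtx.contains (PySem.Str.lower (PySem.List.pyGetD tokens (i - 1) ""))) ||
     (decide (i < (tokens.length : Int) - 1) && pvSwCtx.contains (PySem.Str.lower (PySem.List.pyGetD tokens (i + 1) ""))))

def label_sentence_CreativeWorks_Software (tokens : List String) : List Int :=
  (PySem.List.enumerate tokens 0).foldl
    (fun labels p =>
      if pvCondA tokens p then labels ++ [(16 : Int)] else labels ++ [(-1 : Int)])
    []

-- ===== PORT B =====
-- tokens[j].lower() (indices are in range wherever B reads them)
def pvLowAt (tokens : List String) (j : Int) : String :=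
  PySem.Str.lower (PySem.List.pyGetD tokens j "")

-- the body of B's edge loop: the positions pair (j, j+1) adds to 'marked'
def pvMarkStep (tokens : List String) (s : PySem.Set Int) (j : Int) : PySem.Set Int :=
  let s1 := if pvSwInd.contains (pvLowAt tokens j) &&
               (pvSwInd.contains (pvLowAt tokens (j + 1)) || pvSwCtx.contains (pvLowAt tokens (j + 1)))
            then PySem.Set.add s j else s
  if pvSwInd.contains (pvLowAt tokens (j + 1)) &&
     (pvSwInd.contains (pvLowAt tokens j) || pvSwCtx.contains (pvLowAt tokens j))
  then PySem.Set.add s1 (j + 1) else s1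

def label_sentence_CreativeWorks_Software_alt (tokens : List String) : List Int :=
  let n : Int := tokens.length
  let marked := (PySem.List.pyRange 0 (n - 1) 1).foldl (pvMarkStep tokens) PySem.Set.empty
  (PySem.List.pyRange 0 n 1).map
    (fun i => if PySem.Set.contains marked i then (16 : Int) else (-1 : Int))

-- ===== PRECONDITION & SPEC =====
def Spec_label_sentence_CreativeWorks_Software (tokens : List String) (out : List Int) : Prop := out = label_sentence_CreativeWorks_Software_alt tokens
instance (tokens : List String) (out : List Int) : Decidable (Spec_label_sentence_CreativeWorks_Software tokens out) := by unfold Spec_label_sentence_CreativeWorks_Software; infer_instance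

-- ===== CLAIM (what is proved, stated in full; the proofs are below) =====
def Claim_equal_label_sentence_CreativeWorks_Software : Prop := ∀ (tokens : List String), Dom_label_sentence_CreativeWorks_Software tokens → Spec_label_sentence_CreativeWorks_Software tokens (label_sentence_CreativeWorks_Software tokens)

-- ===== LEMMAS AND PROOFS =====

-- the positions edge j contributes to 'marked', as a predicate on i
def pvAdds (tokens : List String) (j i : Int) : Prop :=
  (i = j ∧ pvSwInd.contains (pvLowAt tokens j) = true ∧
     (pvSwInd.contains (pvLowAt tokens (j + 1)) = true ∨ pvSwCtx.contains (pvLowAt tokens (j + 1)) = true)) ∨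
  (i = j + 1 ∧ pvSwInd.contains (pvLowAt tokens (j + 1)) = true ∧
     (pvSwInd.contains (pvLowAt tokens j) = true ∨ pvSwCtx.contains (pvLowAt tokens j) = true))

theorem pv_mem_step (tokens : List String) (s : PySem.Set Int) (j i : Int) :
    i ∈ pvMarkStep tokens s j ↔ i ∈ s ∨ pvAdds tokens j i := by
  unfold pvMarkStep pvAdds
  generalize pvSwInd.contains (pvLowAt tokens j) = A
  generalize pvSwInd.contains (pvLowAt tokens (j + 1)) = B
  generalize pvSwCtx.contains (pvLowAt tokens j) = C
  generalize pvSwCtx.contains (pvLowAt tokens (j + 1)) = D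
  cases A <;> cases B <;> cases C <;> cases D <;>
    simp [PySem.Set.mem_add] <;> tauto

theorem pv_mem_fold (tokens : List String) (l : List Int) (s : PySem.Set Int) (i : Int) :
    i ∈ l.foldl (pvMarkStep tokens) s ↔ i ∈ s ∨ ∃ j ∈ l, pvAdds tokens j i := by
  induction l generalizing s with
  | nil => simp
  | cons j l ih =>
    simp only [List.foldl_cons, ih, pv_mem_step, List.mem_cons]
    constructor
    · rintro ((h | h) | ⟨k, hk, h⟩)
      · exact Or.inl h
      · exact Or.inr ⟨j, Or.inl rfl, h⟩
      · exact Or.inr ⟨k, Or.inr hk, h⟩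
    · rintro (h | ⟨k, (rfl | hk), h⟩)
      · exact Or.inl (Or.inl h)
      · exact Or.inl (Or.inr h)
      · exact Or.inr ⟨k, hk, h⟩

-- per-position agreement: A's neighbour condition = membership in B's marked set
theorem pv_cond_eq_marked (tokens : List String) (i : Int)
    (h0 : 0 ≤ i) (h1 : i < (tokens.length : Int)) :
    pvCondA tokens (i, PySem.List.pyGetD tokens i "") =
      PySem.Set.contains
        ((PySem.List.pyRange 0 ((tokens.length : Int) - 1) 1).foldl (pvMarkStep tokens) PySem.Set.empty) i := by
  rw [Bool.eq_iff_iff, PySem.Set.contains_iff, pv_mem_fold]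
  unfold pvCondA
  simp only [PySem.Set.empty, List.not_mem_nil, false_or, PySem.List.mem_pyRange_one,
    Bool.and_eq_true, Bool.or_eq_true, decide_eq_true_iff]
  constructor
  · rintro ⟨hc, (((⟨hi, hL⟩ | ⟨hi, hR⟩) | ⟨hi, hL⟩) | ⟨hi, hR⟩)⟩
    · exact ⟨i - 1, ⟨by omega, by omega⟩, Or.inr ⟨by omega, by rw [show i - 1 + 1 = i from by omega]; exact ⟨hc, Or.inl hL⟩⟩⟩
    · exact ⟨i, ⟨h0, by omega⟩, Or.inl ⟨rfl, hc, Or.inl hR⟩⟩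
    · exact ⟨i - 1, ⟨by omega, by omega⟩, Or.inr ⟨by omega, by rw [show i - 1 + 1 = i from by omega]; exact ⟨hc, Or.inr hL⟩⟩⟩
    · exact ⟨i, ⟨h0, by omega⟩, Or.inl ⟨rfl, hc, Or.inr hR⟩⟩
  · rintro ⟨j, ⟨hj0, hj1⟩, (⟨rfl, hc, (hR | hR)⟩ | ⟨hi, hc, (hL | hL)⟩)⟩
    · exact ⟨hc, Or.inl (Or.inl (Or.inr ⟨by omega, hR⟩))⟩
    · exact ⟨hc, Or.inr ⟨by omega, hR⟩⟩
    · subst hi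
      rw [show j + 1 - 1 = j from by omega] at *
      exact ⟨hc, Or.inl (Or.inl (Or.inl ⟨by omega, hL⟩))⟩
    · subst hi
      rw [show j + 1 - 1 = j from by omega] at *
      exact ⟨hc, Or.inl (Or.inr ⟨by omega, hL⟩)⟩

-- ===== VERDICT (by name: the statement is the Claim_ definition above) =====
theorem label_sentence_CreativeWorks_Software_spec : Claim_equal_label_sentence_CreativeWorks_Software := by
  intro tokens _
  show label_sentence_CreativeWorks_Software tokens = label_sentence_CreativeWorks_Software_alt tokens
  unfold label_sentence_CreativeWorks_Software label_sentence_CreativeWorks_Software_alt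
  have hfun : (fun (labels : List Int) (p : Int × String) =>
      if pvCondA tokens p then labels ++ [(16 : Int)] else labels ++ [(-1 : Int)])
    = fun labels p => labels ++ [if pvCondA tokens p then (16 : Int) else (-1 : Int)] := by
    funext labels p; split <;> rfl
  rw [hfun, PySem.List.foldl_append_singleton_eq_map, List.nil_append,
      PySem.List.enumerate_eq_map_pyRange tokens "", List.map_map]
  refine List.map_congr_left ?_
  intro i hi
  obtain ⟨h0, h1'⟩ := (PySem.List.mem_pyRange_one).1 hi
  have h1 : i < (tokens.length : Int) := by simpa using h1'
  simp only [Function.comp_apply]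
  rw [pv_cond_eq_marked tokens i h0 h1]
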